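-- pv_equiv track=rewrite | github.com/pypi-data/pypi-mirror-216 | packages/apf-ci/apf-ci-1.2.180.tar.gz/apf-ci-1.2.180/apf_ci/config/language_service.py | language_groups
-- ===== SOURCE A (Python) =====
-- def language_groups(language_enable_parent_map, language_parent_map, language_weight_map):
--     language_groups_list = []
--
--     for language_enable_parent in language_enable_parent_map:
--         language_group = {}
--
--         for language_parent in language_parent_map:
--             if language_parent_map[language_parent] == language_enable_parent:
--                 language_group[language_parent] = language_weight_map[language_parent]
--
--         language_groups_list.append(sort_by_value(language_group))
--
--     return language_groups_list
--
-- def sort_by_value(map):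
--     items = map.items()
--     backitems = [[v[1], v[0]] for v in items]
--     backitems.sort()
--     return [backitems[i][1] for i in range(0, len(backitems))]
-- ===== SOURCE B (Python) =====
-- def language_groups(language_enable_parent_map, language_parent_map, language_weight_map):
--     enabled = set(language_enable_parent_map)
--     buckets = {}
--     for lang, parent in language_parent_map.items():
--         if parent in enabled:
--             buckets.setdefault(parent, []).append((language_weight_map[lang], lang))
--     for b in buckets.values():
--         b.sort()
--     return [[lang for _, lang in buckets.get(p, [])] for p in language_enable_parent_map]
-- ===== Notes on version B (the rewrite author's own statement) =====
-- stated objective: faster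
-- what changed: A rescans the whole parent map once per enabled parent (O(E*P log P)); B makes one pass over the parent map bucketing languages by parent into a dict, sorts each bucket once, and then answers each enabled parent by a dict lookup (O(P log P + E)).
import Mathlib
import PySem

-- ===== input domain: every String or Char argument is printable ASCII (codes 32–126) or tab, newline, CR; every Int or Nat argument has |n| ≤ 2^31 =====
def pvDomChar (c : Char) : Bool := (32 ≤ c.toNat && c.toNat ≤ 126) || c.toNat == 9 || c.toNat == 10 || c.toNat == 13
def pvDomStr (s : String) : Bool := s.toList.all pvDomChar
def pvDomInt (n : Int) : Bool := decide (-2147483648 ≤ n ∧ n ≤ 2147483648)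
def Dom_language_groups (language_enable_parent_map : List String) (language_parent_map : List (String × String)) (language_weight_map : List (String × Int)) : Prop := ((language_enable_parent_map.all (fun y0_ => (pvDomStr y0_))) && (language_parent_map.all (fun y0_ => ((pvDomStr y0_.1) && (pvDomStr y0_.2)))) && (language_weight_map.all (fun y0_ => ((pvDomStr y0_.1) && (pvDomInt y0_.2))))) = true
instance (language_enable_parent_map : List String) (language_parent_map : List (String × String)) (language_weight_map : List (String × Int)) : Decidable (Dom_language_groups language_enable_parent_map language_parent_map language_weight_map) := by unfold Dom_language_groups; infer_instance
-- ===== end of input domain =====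

-- B replaces A's per-enabled-parent rescan of the parent map by a single bucketing pass over the
-- parent map plus one sort per bucket and a dict lookup per enabled parent (objective: faster).

-- ===== PORT A =====
-- sort_by_value(map): backitems = [[v[1], v[0]] for v in map.items()]; backitems.sort();
-- return [backitems[i][1] for i in range(0, len(backitems))]
def sort_by_value (m : PySem.Dict String Int) : List String :=
  let backitems := m.items.map (fun kv => (kv.2, kv.1))
  let sortedb := PySem.List.sorted2 backitems (fun x => x.1) (fun x => x.2)
  (PySem.List.pyRange 0 (sortedb.length : Int) 1).map (fun i => (PySem.List.pyGetD sortedb i (0, "")).2)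

-- language_weight_map[language_parent]: Python raises KeyError when the key is absent;
-- Pre_language_groups excludes exactly those inputs, so the total .getD 0 form is exact on Pre_.
def language_groups (language_enable_parent_map : List String) (language_parent_map : List (String × String)) (language_weight_map : List (String × Int)) : List (List String) :=
  language_enable_parent_map.foldl (fun language_groups_list language_enable_parent =>
    let language_group : PySem.Dict String Int :=
      language_parent_map.foldl (fun g q =>
        if q.2 == language_enable_parent then
          g.insert q.1 ((PySem.Dict.mk language_weight_map).getD q.1 0)
        else g) PySem.Dict.empty
    language_groups_list ++ [sort_by_value language_group]) []

-- ===== PORT B =====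
def language_groups_alt (language_enable_parent_map : List String) (language_parent_map : List (String × String)) (language_weight_map : List (String × Int)) : List (List String) :=
  let enabled := PySem.Set.ofList language_enable_parent_map
  let buckets : PySem.Dict String (List (Int × String)) :=
    language_parent_map.foldl (fun d q =>
      if enabled.contains q.2 then
        d.modify q.2 [] (· ++ [((PySem.Dict.mk language_weight_map).getD q.1 0, q.1)])
      else d) PySem.Dict.empty
  let sortedBuckets : PySem.Dict String (List (Int × String)) :=
    PySem.Dict.mk (buckets.items.map (fun kv => (kv.1, PySem.List.sorted2 kv.2 (fun x => x.1) (fun x => x.2))))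
  language_enable_parent_map.map (fun p => (sortedBuckets.getD p []).map (fun x => x.2))

-- ===== PRECONDITION & SPEC =====
-- The two dict-typed parameters must have unique keys (every Python dict does; a duplicate-key
-- association list denotes no Python input), and every language whose parent is enabled must have
-- a weight, since A raises KeyError on language_weight_map[language_parent] otherwise.
def Pre_language_groups (language_enable_parent_map : List String) (language_parent_map : List (String × String)) (language_weight_map : List (String × Int)) : Prop :=
  (language_parent_map.map Prod.fst).Nodup ∧
  (language_weight_map.map Prod.fst).Nodup ∧
  ∀ q ∈ language_parent_map, q.2 ∈ language_enable_parent_map → q.1 ∈ language_weight_map.map Prod.fst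
instance (language_enable_parent_map : List String) (language_parent_map : List (String × String)) (language_weight_map : List (String × Int)) : Decidable (Pre_language_groups language_enable_parent_map language_parent_map language_weight_map) := by unfold Pre_language_groups; infer_instance
def pvWitness_language_groups : List String × (List (String × String)) × (List (String × Int)) :=
  (["p", "q"], [("en", "p"), ("fr", "p"), ("de", "q")], [("en", 2), ("fr", 1), ("de", 0)])

def Spec_language_groups (language_enable_parent_map : List String) (language_parent_map : List (String × String)) (language_weight_map : List (String × Int)) (out : List (List String)) : Prop := out = language_groups_alt language_enable_parent_map language_parent_map language_weight_map
instance (language_enable_parent_map : List String) (language_parent_map : List (String × String)) (language_weight_map : List (String × Int)) (out : List (List String)) : Decidable (Spec_language_groups language_enable_parent_map language_parent_map language_weight_map out) := by unfold Spec_language_groups; infer_instance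

-- ===== CLAIM (what is proved, stated in full; the proofs are below) =====
def Claim_equal_language_groups : Prop := ∀ (language_enable_parent_map : List String) (language_parent_map : List (String × String)) (language_weight_map : List (String × Int)), Dom_language_groups language_enable_parent_map language_parent_map language_weight_map → Pre_language_groups language_enable_parent_map language_parent_map language_weight_map → Spec_language_groups language_enable_parent_map language_parent_map language_weight_map (language_groups language_enable_parent_map language_parent_map language_weight_map)

-- ===== LEMMAS AND PROOFS =====

-- Looking up a key in a dict whose values were mapped elementwise.
theorem get?_mk_map_values {ν ν' : Type} (l : List (String × ν)) (f : ν → ν') (p : String) :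
    (PySem.Dict.mk (l.map (fun kv => (kv.1, f kv.2)))).get? p = ((PySem.Dict.mk l).get? p).map f := by
  induction l with
  | nil => rfl
  | cons hd tl ih =>
      obtain ⟨k, v⟩ := hd
      simp only [List.map_cons, PySem.Dict.get?_mk_cons]
      by_cases h : k == p
      · simp [h]
      · simp [h, ih]

-- [backitems[i][1] for i in range(0, len(backitems))] is backitems.map snd.
theorem map_snd_index (xs : List (Int × String)) :
    (PySem.List.pyRange 0 (xs.length : Int) 1).map (fun i => (PySem.List.pyGetD xs i (0, "")).2)
      = xs.map (fun x => x.2) := by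
  have h1 : (PySem.List.pyRange 0 (xs.length : Int) 1).map
      (fun i => (PySem.List.pyGetD xs i (0, "")).2)
      = ((PySem.List.pyRange 0 (xs.length : Int) 1).map
          (fun i => PySem.List.pyGetD xs i (0, ""))).map (fun x => x.2) := by
    rw [List.map_map]; rfl
  rw [h1, PySem.List.map_pyGetD_pyRange_zero']

-- For an enabled parent p, A's per-parent group-and-sort equals B's sorted bucket at p.
theorem per_parent_eq (e : List String) (pm : List (String × String)) (w : String → Int)
    (hnd : (pm.map Prod.fst).Nodup) (p : String) (hp : p ∈ e) :
    sort_by_value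
      (pm.foldl (fun g q => if q.2 == p then g.insert q.1 (w q.1) else g) PySem.Dict.empty)
    =
    ((PySem.Dict.mk (((pm.foldl (fun d q =>
          if (PySem.Set.ofList e).contains q.2 then
            d.modify q.2 [] (· ++ [(w q.1, q.1)]) else d)
          PySem.Dict.empty).items).map
            (fun kv => (kv.1, PySem.List.sorted2 kv.2 (fun x => x.1) (fun x => x.2))))).getD p []).map
      (fun x => x.2) := by
  -- A's inner loop: fresh inserts of the pm-entries whose parent is p, in order
  have hfilt : ((pm.filter (fun q => q.2 == p)).map Prod.fst).Nodup :=
    (List.filter_sublist.map Prod.fst).nodup hnd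
  have hA : (pm.foldl (fun g q => if q.2 == p then g.insert q.1 (w q.1) else g)
      (PySem.Dict.empty : PySem.Dict String Int)).items
      = (pm.filter (fun q => q.2 == p)).map (fun q => (q.1, w q.1)) := by
    rw [PySem.List.foldl_if_eq_foldl_filter]
    rw [PySem.Dict.items_foldl_insert_fresh (pm.filter (fun q => q.2 == p)) Prod.fst
        (fun q => w q.1) PySem.Dict.empty (fun a _ => rfl) hfilt]
    rfl
  -- B's bucket at p is the same entries as (weight, language) pairs, in order
  have hB : ((pm.foldl (fun d q =>
        if (PySem.Set.ofList e).contains q.2 then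
          d.modify q.2 [] (· ++ [(w q.1, q.1)]) else d)
        (PySem.Dict.empty : PySem.Dict String (List (Int × String)))).getD p [])
      = (pm.filter (fun q => q.2 == p)).map (fun q => (w q.1, q.1)) := by
    rw [PySem.List.foldl_if_eq_foldl_filter]
    have hmap : (pm.filter (fun q => (PySem.Set.ofList e).contains q.2)).foldl
        (fun d q => d.modify q.2 [] (· ++ [(w q.1, q.1)]))
        (PySem.Dict.empty : PySem.Dict String (List (Int × String)))
        = ((pm.filter (fun q => (PySem.Set.ofList e).contains q.2)).map
            (fun q => (q.2, (w q.1, q.1)))).foldl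
            (fun d pr => d.modify pr.1 [] (· ++ [pr.2])) PySem.Dict.empty := by
      rw [List.foldl_map]
    rw [hmap, PySem.Dict.getD_foldl_modify_append, List.filter_map, List.filter_filter]
    have hcongr : pm.filter (fun q =>
          ((fun pr : String × (Int × String) => pr.1 == p) ∘ fun q => (q.2, (w q.1, q.1))) q
          && (PySem.Set.ofList e).contains q.2)
        = pm.filter (fun q => q.2 == p) := by
      apply List.filter_congr
      intro q _
      by_cases h : q.2 == p
      · have hqp : q.2 = p := by simpa using h
        have hpmem : (PySem.Set.ofList e).contains q.2 = true := by
          rw [hqp]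
          simpa [List.contains_iff_mem] using (PySem.Set.mem_ofList e p).mpr hp
        simp [Function.comp, hqp, hp]
      · simp [Function.comp, h]
    rw [hcongr, List.map_map]
    rfl
  -- B's sorted bucket at p
  have hget : (PySem.Dict.mk (((pm.foldl (fun d q =>
        if (PySem.Set.ofList e).contains q.2 then
          d.modify q.2 [] (· ++ [(w q.1, q.1)]) else d)
        (PySem.Dict.empty : PySem.Dict String (List (Int × String)))).items).map
          (fun kv => (kv.1, PySem.List.sorted2 kv.2 (fun x => x.1) (fun x => x.2))))).getD p []
      = PySem.List.sorted2 ((pm.filter (fun q => q.2 == p)).map (fun q => (w q.1, q.1)))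
          (fun x => x.1) (fun x => x.2) := by
    set d := pm.foldl (fun d q =>
        if (PySem.Set.ofList e).contains q.2 then
          d.modify q.2 [] (· ++ [(w q.1, q.1)]) else d)
        (PySem.Dict.empty : PySem.Dict String (List (Int × String))) with hd
    have hgd : (PySem.Dict.mk (d.items.map
        (fun kv => (kv.1, PySem.List.sorted2 kv.2 (fun x => x.1) (fun x => x.2))))).getD p []
        = ((d.get? p).map (fun v => PySem.List.sorted2 v (fun x => x.1) (fun x => x.2))).getD [] := by
      show ((PySem.Dict.mk (d.items.map
        (fun kv => (kv.1, PySem.List.sorted2 kv.2 (fun x => x.1) (fun x => x.2))))).get? p).getD []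
        = _
      rw [get?_mk_map_values d.items (fun v => PySem.List.sorted2 v (fun x => x.1) (fun x => x.2)) p]
    rw [hgd]
    have hBd : d.getD p [] = (pm.filter (fun q => q.2 == p)).map (fun q => (w q.1, q.1)) := hB
    cases hg : d.get? p with
    | none =>
        have h0 : d.getD p [] = [] := by
          show (d.get? p).getD [] = []
          rw [hg]
          rfl
        have hL : (pm.filter (fun q => q.2 == p)).map (fun q => (w q.1, q.1)) = [] := by
          rw [← hBd, h0]
        rw [hL]
        rfl
    | some v =>
        have h0 : d.getD p [] = v := by
          show (d.get? p).getD [] = v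
          rw [hg]
          rfl
        have hv : v = (pm.filter (fun q => q.2 == p)).map (fun q => (w q.1, q.1)) := by
          rw [← h0, hBd]
        show PySem.List.sorted2 v (fun x => x.1) (fun x => x.2) = _
        rw [hv]
  rw [hget]
  -- A's sort_by_value of that group is the same sorted list projected to languages
  unfold sort_by_value
  rw [hA, List.map_map]
  rw [show ((fun kv : String × Int => (kv.2, kv.1)) ∘ fun q : String × String => (q.1, w q.1))
      = (fun q : String × String => (w q.1, q.1)) from rfl]
  exact map_snd_index _

-- ===== VERDICT (by name: the statement is the Claim_ definition above) =====
theorem language_groups_spec : Claim_equal_language_groups := by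
  intro e pm wm _hdom hpre
  unfold Spec_language_groups
  unfold language_groups language_groups_alt
  simp only []
  rw [PySem.List.foldl_append_singleton_eq_map
    (f := fun p => sort_by_value
      (pm.foldl (fun g q => if q.2 == p then g.insert q.1 ((PySem.Dict.mk wm).getD q.1 0) else g)
        PySem.Dict.empty))]
  rw [List.nil_append]
  apply List.map_congr_left
  intro p hp
  exact per_parent_eq e pm (fun k => (PySem.Dict.mk wm).getD k 0) hpre.1 p hp
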